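-- pv_equiv track=rewrite | github.com/abhisarxverma/MyTuneTale | backend/utils.py | sort_genres
-- ===== SOURCE A (Python) =====
-- def sort_genres(tracks: list):
--
--     genre_count = {}
--
--     for track in tracks:
--
--         genre = track["genre_tag"]
--
--         if genre in genre_count:
--             genre_count[genre] += 1
--
--         else :
--             genre_count[genre] = 1
--
--     genre_count = dict(sorted(genre_count.items(), reverse=True))
--
--     return genre_count
-- ===== SOURCE B (Python) =====
-- def sort_genres(tracks: list):
--     # Sort all genre tags descending, then count consecutive runs (groupby-style):
--     # insertion order of the result is already descending by key, so no final sort.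
--     tags = sorted((track["genre_tag"] for track in tracks), reverse=True)
--     result = {}
--     i = 0
--     while i < len(tags):
--         j = i
--         while j < len(tags) and tags[j] == tags[i]:
--             j += 1
--         result[tags[i]] = j - i
--         i = j
--     return result
-- ===== Notes on version B (the rewrite author's own statement) =====
-- stated objective: alternative
-- what changed: B sorts the list of genre tags descending once and counts consecutive runs (groupby-style), so the result dict is built already in descending key order, instead of A's hash-count followed by sorting the (key,count) items.
import Mathlib
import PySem

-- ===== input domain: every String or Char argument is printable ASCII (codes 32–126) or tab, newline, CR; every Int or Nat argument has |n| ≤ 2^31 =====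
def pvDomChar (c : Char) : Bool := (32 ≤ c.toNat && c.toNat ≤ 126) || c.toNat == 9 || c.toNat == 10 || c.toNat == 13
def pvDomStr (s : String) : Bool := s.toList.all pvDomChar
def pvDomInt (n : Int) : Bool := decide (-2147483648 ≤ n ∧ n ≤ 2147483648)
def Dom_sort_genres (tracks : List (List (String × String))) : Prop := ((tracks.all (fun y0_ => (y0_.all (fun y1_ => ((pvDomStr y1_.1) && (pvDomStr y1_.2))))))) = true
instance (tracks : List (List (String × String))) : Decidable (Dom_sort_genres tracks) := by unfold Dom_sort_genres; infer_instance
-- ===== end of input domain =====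

-- B sorts the genre-tag list descending once and counts consecutive runs (groupby-style),
-- instead of A's hash-count-then-sort-the-items; same return value on Pre_ (every track has the "genre_tag" key).

-- track["genre_tag"]: Pre_ guarantees the key is present; on a missing key Python raises KeyError (excluded by Pre_).
def pvGenre (track : List (String × String)) : String :=
  ((PySem.Dict.mk track).get? "genre_tag").getD ""

-- ===== PORT A =====
def sort_genres (tracks : List (List (String × String))) : List (String × Int) :=
  let genre_count := tracks.foldl (fun d track =>
    let genre := pvGenre track
    if d.contains genre then d.insert genre (d.getD genre 0 + 1)
    else d.insert genre 1) PySem.Dict.empty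
  PySem.List.sorted2 genre_count.items (fun p => p.1) (fun p => p.2) true

-- ===== PORT B =====
-- Source B's run-counting while loop: consume one maximal run of equal tags at a time
def sort_genres_alt_runs : List String → List (String × Int)
  | [] => []
  | x :: xs =>
    (x, 1 + ((xs.takeWhile (· == x)).length : Int)) :: sort_genres_alt_runs (xs.dropWhile (· == x))
termination_by l => l.length
decreasing_by
  exact Nat.lt_succ_of_le (List.dropWhile_sublist _).length_le

def sort_genres_alt (tracks : List (List (String × String))) : List (String × Int) :=
  let tags := PySem.List.sorted (tracks.map pvGenre) (fun x => x) true
  sort_genres_alt_runs tags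

-- ===== PRECONDITION & SPEC =====
-- Pre_ excludes exactly the inputs where Python A raises KeyError: a track without the "genre_tag" key.
def Pre_sort_genres (tracks : List (List (String × String))) : Prop :=
  (tracks.all (fun t => t.any (fun p => p.1 == "genre_tag"))) = true
instance (tracks : List (List (String × String))) : Decidable (Pre_sort_genres tracks) := by
  unfold Pre_sort_genres; infer_instance

def pvWitness_sort_genres : (List (List (String × String))) :=
  [[("genre_tag", "pop")], [("genre_tag", "rock"), ("artist", "x")], [("genre_tag", "pop")]]

def Spec_sort_genres (tracks : List (List (String × String))) (out : List (String × Int)) : Prop := out = sort_genres_alt tracks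
instance (tracks : List (List (String × String))) (out : List (String × Int)) : Decidable (Spec_sort_genres tracks out) := by unfold Spec_sort_genres; infer_instance

-- ===== CLAIM (what is proved, stated in full; the proofs are below) =====
def Claim_equal_sort_genres : Prop := ∀ (tracks : List (List (String × String))), Dom_sort_genres tracks → Pre_sort_genres tracks → Spec_sort_genres tracks (sort_genres tracks)

-- ===== LEMMAS AND PROOFS =====

theorem getD_of_contains_false {κ ν : Type} [BEq κ] (d : PySem.Dict κ ν) (k : κ) (dflt : ν)
    (h : d.contains k = false) : d.getD k dflt = dflt := by
  simp only [PySem.Dict.contains, List.any_eq_false] at h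
  simp [PySem.Dict.getD, PySem.Dict.get?, List.find?_eq_none.mpr (fun p hp => h p hp)]

-- A's counting loop is Counter(tags)
theorem fold_eq_counter (tracks : List (List (String × String))) :
    tracks.foldl (fun d track =>
      let genre := pvGenre track
      if d.contains genre then d.insert genre (d.getD genre 0 + 1)
      else d.insert genre 1) PySem.Dict.empty
    = PySem.Dict.counter (tracks.map pvGenre) := by
  rw [← PySem.Dict.foldl_insert_getD_add_one_eq_counter, List.foldl_map]
  congr 1
  funext d t
  by_cases h : d.contains (pvGenre t)
  · simp [h]
  · simp only [eq_false_of_ne_true h,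
      getD_of_contains_false d (pvGenre t) 0 (eq_false_of_ne_true h)]
    norm_num

-- Python's tuple comparison on (String, Int) pairs is the lexicographic order
theorem sorted2_eq_sorted_lex (xs : List (String × Int)) :
    PySem.List.sorted2 xs (fun p => p.1) (fun p => p.2) true
    = PySem.List.sorted xs (fun p => toLex p) true := by
  have hb : (fun (a b : String × Int) =>
      decide (a.1 < b.1) || (!decide (b.1 < a.1) && decide (a.2 < b.2)))
      = (fun (a b : String × Int) => decide ((toLex a : Lex (String × Int)) < toLex b)) := by
    funext a b
    rcases lt_trichotomy b.1 a.1 with h | h | h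
    · simp [h, not_lt_of_gt h, Prod.Lex.lt_iff]
      exact fun hab => absurd (hab ▸ h) (lt_irrefl _)
    · simp [h, Prod.Lex.lt_iff]
    · simp [h, not_lt_of_gt h, Prod.Lex.lt_iff]
  show List.foldl (fun acc x => PySem.List.insertBy (fun a b =>
      (fun (a b : String × Int) =>
        decide (a.1 < b.1) || (!decide (b.1 < a.1) && decide (a.2 < b.2))) b a) x acc) [] xs
    = List.foldl (fun acc x => PySem.List.insertBy (fun a b =>
      (fun (a b : String × Int) =>
        decide ((toLex a : Lex (String × Int)) < toLex b)) b a) x acc) [] xs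
  rw [hb]

-- two strictly descending rearrangements of each other are equal
theorem eq_of_desc {α κ : Type} [LinearOrder κ] (key : α → κ) (A B : List α)
    (hp : A.Perm B) (hA : A.Pairwise (fun a b => key b < key a))
    (hB : B.Pairwise (fun a b => key b < key a)) : A = B := by
  exact (PySem.List.sorted_rev_eq_of_perm_of_pairwise_gt B A key hp hA).symm.trans
    (PySem.List.sorted_rev_eq_of_perm_of_pairwise_gt B B key (List.Perm.refl B) hB)

theorem foldl_add_eq_append {α : Type} [BEq α] (l : List α) :
    ∀ s : List α, ∃ t, List.foldl PySem.Set.add s l = s ++ t ∧ t.Sublist l := by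
  induction l with
  | nil => intro s; exact ⟨[], by simp⟩
  | cons x l ih =>
    intro s
    simp only [List.foldl_cons]
    rcases (by unfold PySem.Set.add; split <;> simp :
        PySem.Set.add s x = s ∨ PySem.Set.add s x = s ++ [x]) with h | h
    · obtain ⟨t, ht, hs⟩ := ih s
      exact ⟨t, by rw [h, ht], hs.cons x⟩
    · obtain ⟨t, ht, hs⟩ := ih (s ++ [x])
      exact ⟨x :: t, by rw [h, ht, List.append_assoc]; rfl, hs.cons₂ x⟩

theorem ofList_sublist {α : Type} [BEq α] (l : List α) : (PySem.Set.ofList l).Sublist l := by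
  obtain ⟨t, ht, hs⟩ := foldl_add_eq_append l []
  simpa [PySem.Set.ofList, PySem.Set.empty, ht] using hs

theorem pairwise_lt_of_desc_nodup (l : List String)
    (hp : l.Pairwise (fun a b => b ≤ a)) (hn : l.Nodup) :
    l.Pairwise (fun a b => b < a) := by
  exact (hp.and hn).imp (fun h => lt_of_le_of_ne h.1 h.2.symm)

theorem dropWhile_lt (x : String) (xs : List String)
    (h : (x :: xs).Pairwise (fun a b => b ≤ a)) :
    ∀ y ∈ xs.dropWhile (· == x), y < x := by
  induction xs with
  | nil => simp
  | cons z rest ih =>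
    rw [List.pairwise_cons] at h
    obtain ⟨hx, htail⟩ := h
    rw [List.pairwise_cons] at htail
    obtain ⟨hz, hrest⟩ := htail
    by_cases hzx : (z == x) = true
    · rw [List.dropWhile_cons, if_pos hzx]
      apply ih
      rw [List.pairwise_cons]
      exact ⟨fun y hy => hx y (List.mem_cons_of_mem z hy), hrest⟩
    · rw [List.dropWhile_cons, if_neg hzx]
      have hzlt : z < x := lt_of_le_of_ne (hx z (List.mem_cons_self ..)) (by simpa using hzx)
      intro y hy
      rcases List.mem_cons.mp hy with rfl | hy
      · exact hzlt
      · exact lt_of_le_of_lt (hz y hy) hzlt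

-- run-length counting of a descending list yields (first occurrences, multiplicities)
theorem runs_desc (l : List String) :
    l.Pairwise (fun a b => b ≤ a) →
    sort_genres_alt_runs l = (PySem.Set.ofList l).map (fun k => (k, (l.count k : Int))) := by
  induction l using sort_genres_alt_runs.induct with
  | case1 => intro _; simp [sort_genres_alt_runs, PySem.Set.ofList, PySem.Set.empty]
  | case2 x xs ih =>
    intro h
    have hpc := List.pairwise_cons.mp h
    have hx : ∀ y ∈ xs, y ≤ x := hpc.1
    have hxs : xs.Pairwise (fun a b => b ≤ a) := hpc.2
    have hlt : ∀ y ∈ xs.dropWhile (· == x), y < x := dropWhile_lt x xs h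
    have hxdw : x ∉ xs.dropWhile (· == x) := fun hm => lt_irrefl x (hlt x hm)
    have hdwp : (xs.dropWhile (· == x)).Pairwise (fun a b => b ≤ a) :=
      hxs.sublist (List.dropWhile_sublist _)
    have IH := ih hdwp
    have htw : ∀ y ∈ xs.takeWhile (· == x), y = x := by
      intro y hy
      simpa using List.mem_takeWhile_imp hy
    have hmem : ∀ a, a ∈ xs ↔ (a ∈ xs.takeWhile (· == x) ∨ a ∈ xs.dropWhile (· == x)) := by
      intro a
      conv_lhs => rw [← List.takeWhile_append_dropWhile (p := (· == x)) (l := xs)]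
      exact List.mem_append
    have hof : PySem.Set.ofList (x :: xs) = x :: PySem.Set.ofList (xs.dropWhile (· == x)) := by
      apply eq_of_desc (fun y => y)
      · rw [List.perm_ext_iff_of_nodup (PySem.Set.nodup_ofList _)
          (List.nodup_cons.mpr ⟨by simpa [PySem.Set.mem_ofList] using hxdw, PySem.Set.nodup_ofList _⟩)]
        intro a
        rw [PySem.Set.mem_ofList]
        constructor
        · intro ha
          rcases List.mem_cons.mp ha with rfl | ha
          · exact List.mem_cons_self ..
          · rcases (hmem a).mp ha with h1 | h1
            · rw [htw a h1]; exact List.mem_cons_self ..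
            · exact List.mem_cons_of_mem _ (by rwa [PySem.Set.mem_ofList])
        · intro ha
          rcases List.mem_cons.mp ha with rfl | ha
          · exact List.mem_cons_self ..
          · rw [PySem.Set.mem_ofList] at ha
            exact List.mem_cons_of_mem _ ((hmem a).mpr (Or.inr ha))
      · exact pairwise_lt_of_desc_nodup _ (h.sublist (ofList_sublist _)) (PySem.Set.nodup_ofList _)
      · rw [List.pairwise_cons]
        refine ⟨fun y hy => hlt y (by rwa [PySem.Set.mem_ofList] at hy), ?_⟩
        exact pairwise_lt_of_desc_nodup _ (hdwp.sublist (ofList_sublist _)) (PySem.Set.nodup_ofList _)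
    have hctw : (xs.takeWhile (· == x)).count x = (xs.takeWhile (· == x)).length := by
      rw [List.count_eq_length]
      intro b hb
      simp [htw b hb]
    have hcdw : (xs.dropWhile (· == x)).count x = 0 :=
      List.count_eq_zero.mpr hxdw
    have hcx : (x :: xs).count x = (xs.takeWhile (· == x)).length + 1 := by
      rw [List.count_cons_self]
      congr 1
      conv_lhs => rw [← List.takeWhile_append_dropWhile (p := (· == x)) (l := xs)]
      rw [List.count_append, hctw, hcdw]
      omega
    rw [sort_genres_alt_runs, hof, List.map_cons, hcx, IH]
    congr 1
    · push_cast
      simp [add_comm]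
    · apply List.map_congr_left
      intro k hk
      rw [PySem.Set.mem_ofList] at hk
      have hkx : k ≠ x := ne_of_lt (hlt k hk)
      have hktw : k ∉ xs.takeWhile (· == x) := fun hm => hkx (htw k hm)
      have h1 : (x :: xs).count k = (xs.dropWhile (· == x)).count k := by
        rw [List.count_cons, if_neg (by simpa using Ne.symm hkx), Nat.add_zero]
        conv_lhs => rw [← List.takeWhile_append_dropWhile (p := (· == x)) (l := xs)]
        rw [List.count_append, List.count_eq_zero.mpr hktw, Nat.zero_add]
      rw [h1]

theorem main_eq (tracks : List (List (String × String))) :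
    sort_genres tracks = sort_genres_alt tracks := by
  simp only [sort_genres, sort_genres_alt]
  rw [fold_eq_counter, sorted2_eq_sorted_lex]
  set tags := tracks.map pvGenre with htags
  set st := PySem.List.sorted tags (fun x => x) true with hst
  have hstp : st.Pairwise (fun a b => b ≤ a) := PySem.List.sorted_pairwise_rev tags (fun x => x)
  have hstnd : (PySem.Set.ofList st).Nodup := PySem.Set.nodup_ofList st
  have hstperm : st.Perm tags := PySem.List.sorted_perm tags (fun x => x) true
  have hcnt : ∀ k, st.count k = tags.count k := fun k => hstperm.count_eq k
  -- sorted(set(tags)) descending is exactly set(sorted-desc tags)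
  have hS : PySem.List.sorted (PySem.Set.ofList tags) (fun x => x) true = PySem.Set.ofList st := by
    apply PySem.List.sorted_rev_eq_of_perm_of_pairwise_gt
    · rw [List.perm_ext_iff_of_nodup hstnd (PySem.Set.nodup_ofList tags)]
      intro a
      rw [PySem.Set.mem_ofList, PySem.Set.mem_ofList, PySem.List.mem_sorted]
    · exact pairwise_lt_of_desc_nodup _ (hstp.sublist (ofList_sublist st)) hstnd
  rw [runs_desc st hstp]
  have hA : PySem.List.sorted (PySem.Dict.counter tags).items (fun p => toLex p) true
      = (PySem.List.sorted (PySem.Set.ofList tags) (fun x => x) true).map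
          (fun k => (k, (tags.count k : Int))) := by
    apply PySem.List.sorted_rev_eq_of_perm_of_pairwise_gt
    · rw [PySem.Dict.items_counter]
      exact (PySem.List.sorted_perm _ _ _).map _
    · have hp : (PySem.List.sorted (PySem.Set.ofList tags) (fun x => x) true).Pairwise
          (fun a b => b < a) := by
        apply pairwise_lt_of_desc_nodup _ (PySem.List.sorted_pairwise_rev _ _)
        exact ((PySem.List.sorted_perm _ _ _).nodup_iff).mpr (PySem.Set.nodup_ofList tags)
      refine hp.map _ (fun a b hab => ?_)
      rw [Prod.Lex.lt_iff]
      exact Or.inl hab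
  rw [hA, hS]
  apply List.map_congr_left
  intro k _
  rw [hcnt k]

-- ===== VERDICT (by name: the statement is the Claim_ definition above) =====
theorem sort_genres_spec : Claim_equal_sort_genres := by
  intro tracks _ _
  unfold Spec_sort_genres
  exact main_eq tracks
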